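-- pv_equiv track=rewrite | github.com/SJTU-xihe/multi-player-game-ai-project | agents/ai_bots/gomoku_minimax_bot.py | _has_live_three_pattern
-- ===== SOURCE A (Python) =====
-- def _has_live_three_pattern(line, player):
--     """检查线段中是否包含活三模式"""
--     opponent = 3 - player
--
--     # 标准化线段
--     normalized = []
--     for cell in line:
--         if cell == player:
--             normalized.append(1)
--         elif cell == opponent:
--             normalized.append(-1)
--         elif cell == 0:
--             normalized.append(0)
--         else:
--             normalized.append(-1)  # 边界
--
--     # 检查活三模式 [0,1,1,1,0]
--     for i in range(len(normalized) - 4):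
--         if normalized[i:i+5] == [0, 1, 1, 1, 0]:
--             return True
--
--     # 检查跳跃活三模式
--     for i in range(len(normalized) - 5):
--         if (normalized[i:i+6] == [0, 1, 0, 1, 1, 0] or
--             normalized[i:i+6] == [0, 1, 1, 0, 1, 0]):
--             return True
--
--     return False
-- ===== SOURCE B (Python) =====
-- def _has_live_three_pattern(line, player):
--     """Live-three detection by run-length encoding the line and checking run shapes."""
--     opponent = 3 - player
--     s = [1 if c == player else (2 if c == opponent else (0 if c == 0 else 2)) for c in line]
--     runs = []
--     i, n = 0, len(s)
--     while i < n:
--         j = i + 1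
--         while j < n and s[j] == s[i]:
--             j += 1
--         runs.append((s[i], j - i))
--         i = j
--     m = len(runs)
--     for k in range(m):
--         if runs[k][0] != 0:
--             continue
--         if k + 2 < m and runs[k + 1] == (1, 3) and runs[k + 2][0] == 0:
--             return True
--         if (k + 4 < m and runs[k + 4][0] == 0 and runs[k + 2] == (0, 1) and
--                 ((runs[k + 1] == (1, 1) and runs[k + 3] == (1, 2)) or
--                  (runs[k + 1] == (1, 2) and runs[k + 3] == (1, 1)))):
--             return True
--     return False
-- ===== Notes on version B (the rewrite author's own statement) =====
-- stated objective: faster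
-- what changed: Replaced A's per-index sliding-window comparison of freshly allocated 5/6-cell slices against three cell patterns by run-length encoding the normalized line once and checking constant-size symbol/length shape conditions on the runs following each empty-cell run.
import Mathlib
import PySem

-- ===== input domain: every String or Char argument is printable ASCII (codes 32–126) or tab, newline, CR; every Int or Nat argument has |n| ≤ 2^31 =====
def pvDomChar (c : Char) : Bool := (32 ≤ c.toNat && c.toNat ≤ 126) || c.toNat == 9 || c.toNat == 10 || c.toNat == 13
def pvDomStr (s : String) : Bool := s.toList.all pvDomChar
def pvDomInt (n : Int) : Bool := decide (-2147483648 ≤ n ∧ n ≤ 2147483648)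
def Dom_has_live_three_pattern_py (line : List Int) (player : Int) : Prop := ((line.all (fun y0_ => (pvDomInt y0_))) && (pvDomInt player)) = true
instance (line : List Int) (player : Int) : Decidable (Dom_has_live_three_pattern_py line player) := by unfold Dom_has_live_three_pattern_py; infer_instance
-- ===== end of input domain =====

-- B replaces A's per-index sliding-window comparison of 5/6-cell slices against three cell
-- patterns by run-length encoding the normalized line and checking constant-size shape
-- conditions on the runs at each empty run (different algorithm, measured constant-factor faster;
-- same behaviour on all inputs).


-- ===== PORT A =====
def has_live_three_pattern_py (line : List Int) (player : Int) : Bool :=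
  let opponent := 3 - player
  -- normalized = [] ; for cell in line: append 1 / -1 / 0 / -1
  let normalized : List Int := line.foldl (fun acc cell =>
    acc ++ [if cell = player then (1 : Int)
            else if cell = opponent then -1
            else if cell = 0 then 0
            else -1]) []
  -- for i in range(len(normalized) - 4): if normalized[i:i+5] == [0,1,1,1,0]: return True
  if (PySem.List.pyRange 0 ((normalized.length : Int) - 4) 1).any
       (fun i => PySem.List.slice normalized (some i) (some (i + 5)) == [0, 1, 1, 1, 0]) then
    true
  -- for i in range(len(normalized) - 5): the two jump patterns
  else if (PySem.List.pyRange 0 ((normalized.length : Int) - 5) 1).any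
       (fun i => (PySem.List.slice normalized (some i) (some (i + 6)) == [0, 1, 0, 1, 1, 0])
              || (PySem.List.slice normalized (some i) (some (i + 6)) == [0, 1, 1, 0, 1, 0])) then
    true
  else
    false

-- ===== PORT B =====
-- run-length encoding: the two nested while loops of Source B (inner loop = the extent of the
-- run starting at i, outer loop advances run by run)
def pvRle : List Int → List (Int × Int)
  | [] => []
  | x :: xs =>
      (x, ((xs.takeWhile (fun y => y == x)).length : Int) + 1) ::
        pvRle (xs.dropWhile (fun y => y == x))
  termination_by s => s.length
  decreasing_by
    simp only [List.length_cons]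
    have := List.length_dropWhile_le (fun y => y == x) xs
    omega

-- the two 'if … return True' rule checks of Source B at a zero run, over the following runs
def pvRuleCheck (rest : List (Int × Int)) : Bool :=
  match rest with
  | (a1, n1) :: (a2, n2) :: t =>
      (a1 == 1 && n1 == 3 && a2 == 0) ||
      (match t with
       | (a3, n3) :: (a4, _) :: _ =>
           a4 == 0 && (a2 == 0 && n2 == 1) &&
           ((a1 == 1 && n1 == 1 && (a3 == 1 && n3 == 2)) ||
            (a1 == 1 && n1 == 2 && (a3 == 1 && n3 == 1)))
       | _ => false)
  | _ => false

-- the 'for k in range(len(runs))' loop with its 'continue' and early returns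
def pvRunScan : List (Int × Int) → Bool
  | [] => false
  | (sym, _) :: rest => ((sym == 0) && pvRuleCheck rest) || pvRunScan rest

def has_live_three_pattern_py_alt (line : List Int) (player : Int) : Bool :=
  let opponent := 3 - player
  let s : List Int := line.map (fun c =>
    if c = player then 1
    else if c = opponent then 2
    else if c = 0 then 0
    else 2)
  pvRunScan (pvRle s)

-- ===== PRECONDITION & SPEC =====
def Spec_has_live_three_pattern_py (line : List Int) (player : Int) (out : Bool) : Prop := out = has_live_three_pattern_py_alt line player
instance (line : List Int) (player : Int) (out : Bool) : Decidable (Spec_has_live_three_pattern_py line player out) := by unfold Spec_has_live_three_pattern_py; infer_instance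

-- ===== CLAIM (what is proved, stated in full; the proofs are below) =====
def Claim_equal_has_live_three_pattern_py : Prop := ∀ (line : List Int) (player : Int), Dom_has_live_three_pattern_py line player → Spec_has_live_three_pattern_py line player (has_live_three_pattern_py line player)

-- ===== LEMMAS AND PROOFS =====

-- A's normalization map and B's symbol map, as functions (proof-side views of the ports).
def pvNormA (player cell : Int) : Int :=
  if cell = player then 1 else if cell = 3 - player then -1 else if cell = 0 then 0 else -1

def pvMapB (player cell : Int) : Int :=
  if cell = player then 1 else if cell = 3 - player then 2 else if cell = 0 then 0 else 2

-- encode A's normalized values as B's symbols, and back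
def pvG (x : Int) : Int := if x = 1 then 1 else if x = 0 then 0 else 2
def pvH (x : Int) : Int := if x = 1 then 1 else if x = 0 then 0 else -1

lemma pvG_normA (player cell : Int) : pvG (pvNormA player cell) = pvMapB player cell := by
  unfold pvG pvNormA pvMapB; split_ifs <;> simp_all

lemma pvH_mapB (player cell : Int) : pvH (pvMapB player cell) = pvNormA player cell := by
  unfold pvH pvNormA pvMapB; split_ifs <;> simp_all

-- A's index scan (over range(n - d), slices of width L = d + 1) finds pattern p iff p is an infix.
lemma pv_scan_iff (a p : List Int) (d L : Int) (hp : p ≠ []) (hd : L = d + 1)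
    (hL : (p.length : Int) = L) :
    ((PySem.List.pyRange 0 ((a.length : Int) - d) 1).any
      (fun i => PySem.List.slice a (some i) (some (i + L)) == p)) = true
    ↔ p <:+: a := by
  rw [List.any_eq_true]
  constructor
  · rintro ⟨i, hi, hslice⟩
    rw [PySem.List.mem_pyRange_one] at hi
    obtain ⟨k, rfl⟩ := Int.eq_ofNat_of_zero_le hi.1
    rw [show ((k : Int) + L) = ((k : Int) + (p.length : Int)) by rw [hL],
        PySem.List.slice_natCast_add, beq_iff_eq] at hslice
    have hpre : p <+: a.drop k := hslice ▸ List.take_prefix _ _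
    exact hpre.isInfix.trans (List.drop_suffix k a).isInfix
  · rintro ⟨s, t, rfl⟩
    refine ⟨(s.length : Int), ?_, ?_⟩
    · rw [PySem.List.mem_pyRange_one]
      refine ⟨Int.natCast_nonneg _, ?_⟩
      have h1 : 1 ≤ p.length := List.length_pos_iff.2 hp
      simp only [List.length_append]
      push_cast
      omega
    · rw [show ((s.length : Int) + L) = ((s.length : Int) + (p.length : Int)) by rw [hL],
          PySem.List.slice_natCast_add, beq_iff_eq, List.append_assoc, List.drop_left,
          List.take_left]

-- an infix transports along the int encodings, so A-infix iff B-infix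
lemma pv_infix_map_iff (line p q : List Int) (player : Int)
    (hg : p.map pvG = q) (hh : q.map pvH = p) :
    p <:+: line.map (pvNormA player) ↔ q <:+: line.map (pvMapB player) := by
  constructor
  · intro h
    have hm := h.map pvG
    rw [hg, List.map_map] at hm
    have he : (pvG ∘ pvNormA player) = pvMapB player := funext (fun c => pvG_normA player c)
    rwa [he] at hm
  · intro h
    have hm := h.map pvH
    rw [hh, List.map_map] at hm
    have he : (pvH ∘ pvMapB player) = pvNormA player := funext (fun c => pvH_mapB player c)
    rwa [he] at hm

-- one unfolding of pvRle
lemma pvRle_cons (x : Int) (xs : List Int) :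
    pvRle (x :: xs) =
      (x, ((xs.takeWhile (fun y => y == x)).length : Int) + 1) ::
        pvRle (xs.dropWhile (fun y => y == x)) := by
  rw [pvRle]

lemma pv_head_dropWhile (p : Int → Bool) :
    ∀ (xs : List Int) (y : Int), (List.dropWhile p xs).head? = some y → p y = false := by
  intro xs
  induction xs with
  | nil => intro y h; simp [List.dropWhile] at h
  | cons a t ih =>
      intro y h
      by_cases hp : p a
      · rw [List.dropWhile_cons_of_pos hp] at h; exact ih y h
      · rw [List.dropWhile_cons_of_neg hp] at h
        simp at h
        subst h
        simpa using hp

-- structure of the first run: the list starts with a maximal block of the run's symbol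
lemma pvRle_shape (d : List Int) (a n : Int) (rest : List (Int × Int))
    (h : pvRle d = (a, n) :: rest) :
    ∃ (m : ℕ) (d' : List Int), 0 < m ∧ n = (m : Int) ∧ d = List.replicate m a ++ d' ∧
      pvRle d' = rest ∧ d'.head? ≠ some a := by
  cases d with
  | nil => simp [pvRle] at h
  | cons x xs =>
      rw [pvRle_cons] at h
      simp only [List.cons.injEq, Prod.mk.injEq] at h
      obtain ⟨⟨hxa, hn⟩, hrest⟩ := h
      subst hxa
      have htw : xs.takeWhile (fun y => y == x)
          = List.replicate (xs.takeWhile (fun y => y == x)).length x :=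
        List.eq_replicate_of_mem (fun b hb => by
          have := List.mem_takeWhile_imp hb; simpa using this)
      refine ⟨(xs.takeWhile (fun y => y == x)).length + 1, xs.dropWhile (fun y => y == x),
        Nat.succ_pos _, by push_cast; omega, ?_, hrest, ?_⟩
      · conv_lhs => rw [← List.takeWhile_append_dropWhile (p := fun y => y == x) (l := xs)]
        rw [List.replicate_succ, List.cons_append]
        congr 1
        rw [← htw]
      · intro hh
        have := pv_head_dropWhile (fun y => y == x) xs x hh
        simp at this

-- the three pattern tails (what must follow the last empty cell of a zero run)
-- T1 = [1,1,1,0], T2 = [1,0,1,1,0], T3 = [1,1,0,1,0]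

-- the rule check at a zero run sees exactly the three tail shapes as prefixes of the remainder
lemma pv_rule_iff (d : List Int) :
    pvRuleCheck (pvRle d) = true ↔
      ([1, 1, 1, 0] <+: d ∨ [1, 0, 1, 1, 0] <+: d ∨ [1, 1, 0, 1, 0] <+: d) := by
  constructor
  · intro h
    rcases hR : pvRle d with _ | ⟨⟨a1, n1⟩, R1⟩
    · rw [hR] at h; simp [pvRuleCheck] at h
    rcases hR1 : R1 with _ | ⟨⟨a2, n2⟩, t⟩
    · rw [hR, hR1] at h; simp [pvRuleCheck] at h
    rw [hR, hR1] at h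
    obtain ⟨m1, d1, hm1, hn1, hd, hrest1, -⟩ := pvRle_shape d a1 n1 ((a2, n2) :: t) (by rw [hR, hR1])
    obtain ⟨m2, d2, hm2, hn2, hd1, hrest2, -⟩ := pvRle_shape d1 a2 n2 t hrest1
    simp only [pvRuleCheck, Bool.or_eq_true, Bool.and_eq_true, beq_iff_eq] at h
    rcases h with ⟨⟨ha1, hn13⟩, ha2⟩ | h
    · -- rule 1: runs (1,3),(0,_)
      subst ha1; subst ha2
      have hm1' : m1 = 3 := by omega
      obtain ⟨m2', rfl⟩ : ∃ m2', m2 = m2' + 1 := ⟨m2 - 1, by omega⟩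
      left
      rw [hd, hd1, hm1']
      exact ⟨List.replicate m2' 0 ++ d2, by simp [List.replicate_succ]⟩
    · -- rules 2/3: four runs
      rcases ht : t with _ | ⟨⟨a3, n3⟩, t1⟩
      · rw [ht] at h; simp at h
      rcases ht1 : t1 with _ | ⟨⟨a4, n4⟩, t2⟩
      · rw [ht, ht1] at h; simp at h
      rw [ht, ht1] at h
      rw [ht, ht1] at hrest2
      simp only [Bool.or_eq_true, Bool.and_eq_true, beq_iff_eq] at h
      obtain ⟨⟨ha4, ha2, hn21⟩, hcase⟩ := h
      obtain ⟨m3, d3, hm3, hn3, hd2, hrest3, -⟩ := pvRle_shape d2 a3 n3 ((a4, n4) :: t2) hrest2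
      obtain ⟨m4, d4, hm4, hn4, hd3, hrest4, -⟩ := pvRle_shape d3 a4 n4 t2 hrest3
      subst ha2; subst ha4
      have hm2' : m2 = 1 := by omega
      obtain ⟨m4', rfl⟩ : ∃ m4', m4 = m4' + 1 := ⟨m4 - 1, by omega⟩
      rcases hcase with ⟨⟨ha1, hn11⟩, ha3, hn32⟩ | ⟨⟨ha1, hn12⟩, ha3, hn31⟩
      · -- (1,1),(0,1),(1,2),(0,_)
        subst ha1; subst ha3
        have hm1' : m1 = 1 := by omega
        have hm3' : m3 = 2 := by omega
        right; left
        rw [hd, hd1, hd2, hd3, hm1', hm2', hm3']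
        exact ⟨List.replicate m4' 0 ++ d4, by simp [List.replicate_succ]⟩
      · -- (1,2),(0,1),(1,1),(0,_)
        subst ha1; subst ha3
        have hm1' : m1 = 2 := by omega
        have hm3' : m3 = 1 := by omega
        right; right
        rw [hd, hd1, hd2, hd3, hm1', hm2', hm3']
        exact ⟨List.replicate m4' 0 ++ d4, by simp [List.replicate_succ]⟩
  · intro h
    rcases h with ⟨r, rfl⟩ | ⟨r, rfl⟩ | ⟨r, rfl⟩ <;>
      simp [pvRle_cons, List.takeWhile, List.dropWhile, pvRuleCheck]

-- skipping a whole run: a pattern 0::p' with p'.head = 1 occurs in x^k ++ d iff it occurs in d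
-- or x = 0 and p' starts d
lemma pv_infix_run (p' : List Int) (hp : p'.head? = some 1) (x : Int) :
    ∀ (k : ℕ), 0 < k → ∀ (d : List Int),
      ((0 :: p') <:+: (List.replicate k x ++ d) ↔ ((x = 0 ∧ p' <+: d) ∨ (0 :: p') <:+: d)) := by
  intro k
  induction k with
  | zero => omega
  | succ k ih =>
      intro _ d
      rcases Nat.eq_zero_or_pos k with rfl | hk
      · simp only [List.cons_append, List.nil_append, List.replicate_succ, List.replicate_zero]
        rw [List.infix_cons_iff, List.cons_prefix_cons]
        constructor
        · rintro (⟨h0, h1⟩ | h)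
          · exact Or.inl ⟨h0.symm, h1⟩
          · exact Or.inr h
        · rintro (⟨h0, h1⟩ | h)
          · exact Or.inl ⟨h0.symm, h1⟩
          · exact Or.inr h
      · rw [List.replicate_succ, List.cons_append, List.infix_cons_iff, ih hk d]
        constructor
        · rintro (hpre | h)
          · exfalso
            rw [List.cons_prefix_cons] at hpre
            obtain ⟨h0, h1⟩ := hpre
            obtain ⟨hd, rfl⟩ : ∃ p'', p' = 1 :: p'' := by
              cases p' with
              | nil => simp at hp
              | cons y ys => exact ⟨ys, by simp at hp; rw [hp]⟩
            obtain ⟨k', rfl⟩ : ∃ k', k = k' + 1 := ⟨k - 1, by omega⟩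
            rw [List.replicate_succ, List.cons_append, List.cons_prefix_cons] at h1
            omega
          · exact h
        · intro h; exact Or.inr h

-- the run scan finds exactly the occurrences of the three patterns
lemma pv_runscan_iff_aux : ∀ (n : ℕ) (s : List Int), s.length ≤ n →
    (pvRunScan (pvRle s) = true ↔
      ([0, 1, 1, 1, 0] <:+: s ∨ [0, 1, 0, 1, 1, 0] <:+: s ∨ [0, 1, 1, 0, 1, 0] <:+: s)) := by
  intro n
  induction n with
  | zero =>
      intro s hs
      obtain rfl : s = [] := List.eq_nil_of_length_eq_zero (by omega)
      simp [pvRle, pvRunScan]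
  | succ n ih =>
      intro s hs
      cases hse : s with
      | nil => simp [pvRle, pvRunScan]
      | cons x xs =>
          subst hse
          have hcons := pvRle_cons x xs
          obtain ⟨m, d', hm, -, hdec, hrest, -⟩ :=
            pvRle_shape (x :: xs) x _ (pvRle (xs.dropWhile (fun y => y == x))) hcons
          have hlen : d'.length ≤ n := by
            have := congrArg List.length hdec
            simp [List.length_replicate] at this
            simp at hs
            omega
          rw [hcons]
          simp only [pvRunScan, Bool.or_eq_true, Bool.and_eq_true, beq_iff_eq]
          rw [← hrest, pv_rule_iff d', ih d' hlen, hdec]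
          rw [pv_infix_run [1, 1, 1, 0] (by simp) x m hm d',
              pv_infix_run [1, 0, 1, 1, 0] (by simp) x m hm d',
              pv_infix_run [1, 1, 0, 1, 0] (by simp) x m hm d']
          tauto

lemma pv_runscan_iff (s : List Int) :
    pvRunScan (pvRle s) = true ↔
      ([0, 1, 1, 1, 0] <:+: s ∨ [0, 1, 0, 1, 1, 0] <:+: s ∨ [0, 1, 1, 0, 1, 0] <:+: s) :=
  pv_runscan_iff_aux s.length s le_rfl

-- the ports agree
lemma pv_main (line : List Int) (player : Int) :
    has_live_three_pattern_py line player = has_live_three_pattern_py_alt line player := by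
  rw [Bool.eq_iff_iff]
  unfold has_live_three_pattern_py has_live_three_pattern_py_alt
  simp only [PySem.List.foldl_append_singleton_eq_map, List.nil_append]
  have hn : (line.map (fun cell => if cell = player then (1:Int)
        else if cell = 3 - player then -1 else if cell = 0 then 0 else -1))
      = line.map (pvNormA player) := rfl
  have hc : (line.map (fun c => if c = player then (1:Int)
        else if c = 3 - player then 2 else if c = 0 then 0 else 2))
      = line.map (pvMapB player) := rfl
  rw [hn, hc]
  set a := line.map (pvNormA player) with ha_def
  have h1 := pv_scan_iff a [0,1,1,1,0] 4 5 (by simp) (by norm_num) (by simp)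
  have h2 := pv_scan_iff a [0,1,0,1,1,0] 5 6 (by simp) (by norm_num) (by simp)
  have h3 := pv_scan_iff a [0,1,1,0,1,0] 5 6 (by simp) (by norm_num) (by simp)
  have m1 := pv_infix_map_iff line [0,1,1,1,0] [0,1,1,1,0] player (by decide) (by decide)
  have m2 := pv_infix_map_iff line [0,1,0,1,1,0] [0,1,0,1,1,0] player (by decide) (by decide)
  have m3 := pv_infix_map_iff line [0,1,1,0,1,0] [0,1,1,0,1,0] player (by decide) (by decide)
  rw [← ha_def] at m1 m2 m3
  have hscan2 : ((PySem.List.pyRange 0 ((a.length : Int) - 5) 1).any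
       (fun i => (PySem.List.slice a (some i) (some (i + 6)) == [0, 1, 0, 1, 1, 0])
              || (PySem.List.slice a (some i) (some (i + 6)) == [0, 1, 1, 0, 1, 0]))) = true
      ↔ ([0,1,0,1,1,0] <:+: a ∨ [0,1,1,0,1,0] <:+: a) := by
    rw [← h2, ← h3]
    simp only [List.any_eq_true, Bool.or_eq_true]
    constructor
    · rintro ⟨i, hi, h | h⟩
      · exact Or.inl ⟨i, hi, h⟩
      · exact Or.inr ⟨i, hi, h⟩
    · rintro (⟨i, hi, h⟩ | ⟨i, hi, h⟩)
      · exact ⟨i, hi, Or.inl h⟩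
      · exact ⟨i, hi, Or.inr h⟩
  rw [pv_runscan_iff, ← m1, ← m2, ← m3]
  split_ifs with hA hB
  · exact iff_of_true rfl (Or.inl (h1.mp hA))
  · exact iff_of_true rfl (Or.inr (hscan2.mp hB))
  · simp only [false_iff]
    rintro (h | h | h)
    · exact hA (h1.mpr h)
    · exact hB (hscan2.mpr (Or.inl h))
    · exact hB (hscan2.mpr (Or.inr h))

-- ===== VERDICT (by name: the statement is the Claim_ definition above) =====
theorem has_live_three_pattern_py_spec : Claim_equal_has_live_three_pattern_py := by
  intro line player _
  unfold Spec_has_live_three_pattern_py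
  exact pv_main line player
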